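-- pv_equiv track=rewrite | github.com/barkirsh/NLP_ASS1 | longest_ngram_ANOTHER.py | find_all_segments
-- ===== SOURCE A (Python) =====
-- from collections import Counter
--
-- def find_all_segments(tokens, min_freq=2):
--     """
--     Find all segments where all tokens appear at least `min_freq` times.
--     """
--     token_freq = Counter(tokens)
--     segments = []
--     current_segment = []
--
--     for token in tokens:
--         if token_freq[token] >= min_freq:
--             current_segment.append(token)
--         else:
--             if current_segment:
--                 segments.append(current_segment)
--                 current_segment = []
--     if current_segment:
--         segments.append(current_segment)
--
--     return segments
-- ===== SOURCE B (Python) =====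
-- from collections import Counter
--
-- def find_all_segments(tokens, min_freq=2):
--     """
--     Find all segments where all tokens appear at least `min_freq` times.
--     Staged approach: locate the positions of infrequent tokens (the cut
--     points), then slice the token list between consecutive cut points.
--     """
--     freq = Counter(tokens)
--     cuts = [i for i, t in enumerate(tokens) if freq[t] < min_freq]
--     bounds = [-1] + cuts + [len(tokens)]
--     return [tokens[a + 1:b] for a, b in zip(bounds, bounds[1:]) if b - a > 1]
-- ===== Notes on version B (the rewrite author's own statement) =====
-- stated objective: alternative
-- what changed: Instead of a single pass that buffers a current segment and flushes it on infrequent tokens, B first computes the index positions of all infrequent tokens (the cut points) and then produces the segments by slicing the token list between consecutive cut points.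
import Mathlib
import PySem

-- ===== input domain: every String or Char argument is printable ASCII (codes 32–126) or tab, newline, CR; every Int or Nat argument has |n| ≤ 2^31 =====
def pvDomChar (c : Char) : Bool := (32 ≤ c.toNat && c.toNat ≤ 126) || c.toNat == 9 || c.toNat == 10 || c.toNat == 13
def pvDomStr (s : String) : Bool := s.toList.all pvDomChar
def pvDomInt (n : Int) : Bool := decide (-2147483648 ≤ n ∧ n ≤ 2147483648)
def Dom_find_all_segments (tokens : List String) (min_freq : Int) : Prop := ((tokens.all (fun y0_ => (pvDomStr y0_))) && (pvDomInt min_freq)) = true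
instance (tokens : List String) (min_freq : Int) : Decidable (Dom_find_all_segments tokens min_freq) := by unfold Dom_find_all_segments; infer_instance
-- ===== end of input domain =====

-- B replaces A's buffer-and-flush accumulator pass by a staged, index-based computation:
-- first the positions of the infrequent tokens (the cut points), then the segments as
-- slices of the token list between consecutive cut points (objective: alternative).

-- ===== PORT A =====
-- literal port of A: Counter, then a left-to-right loop carrying (segments, current_segment),
-- flushing current_segment on an infrequent token and once more after the loop.
def find_all_segments (tokens : List String) (min_freq : Int) : List (List String) :=
  let token_freq := PySem.Dict.counter tokens
  let st := tokens.foldl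
    (fun (st : List (List String) × List String) token =>
      if min_freq ≤ token_freq.getD token 0 then (st.1, st.2 ++ [token])
      else if st.2 ≠ [] then (st.1 ++ [st.2], ([] : List String))
      else st)
    ([], ([] : List String))
  if st.2 ≠ [] then st.1 ++ [st.2] else st.1

-- ===== PORT B =====
-- literal port of Source B: cut positions via enumerate, then slices between consecutive bounds.
def find_all_segments_alt (tokens : List String) (min_freq : Int) : List (List String) :=
  let freq := PySem.Dict.counter tokens
  let cuts := (PySem.List.enumerate tokens).filterMap
    (fun it => if freq.getD it.2 0 < min_freq then some it.1 else none)
  let bounds := ([-1] : List Int) ++ cuts ++ [(tokens.length : Int)]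
  (bounds.zip bounds.tail).filterMap
    (fun ab => if 1 < ab.2 - ab.1 then some (PySem.List.slice tokens (some (ab.1 + 1)) (some ab.2)) else none)

-- ===== PRECONDITION & SPEC =====
def Spec_find_all_segments (tokens : List String) (min_freq : Int) (out : List (List String)) : Prop := out = find_all_segments_alt tokens min_freq
instance (tokens : List String) (min_freq : Int) (out : List (List String)) : Decidable (Spec_find_all_segments tokens min_freq out) := by unfold Spec_find_all_segments; infer_instance

-- ===== CLAIM (what is proved, stated in full; the proofs are below) =====
def Claim_equal_find_all_segments : Prop := ∀ (tokens : List String) (min_freq : Int), Dom_find_all_segments tokens min_freq → Spec_find_all_segments tokens min_freq (find_all_segments tokens min_freq)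

-- ===== LEMMAS AND PROOFS =====

-- run-length grouping of tokens by a boolean predicate (intermediate notion both sides are
-- reduced to; recursion from the right, merging into the head group of the recursive result)
def pvGroupby (p : String → Bool) : List String → List (Bool × List String)
  | [] => []
  | t :: ts =>
    match pvGroupby p ts with
    | (k, g) :: rest => if p t = k then (k, t :: g) :: rest else (p t, [t]) :: (k, g) :: rest
    | [] => [(p t, [t])]

-- the frequent groups of a run-length grouping
def pvFilt (groups : List (Bool × List String)) : List (List String) :=
  groups.filterMap (fun g => if g.1 then some g.2 else none)

-- what A's loop produces from state (segs, cur) on the rest of the input, phrased on B's groups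
def pvGlue (groups : List (Bool × List String)) (cur : List String) : List (List String) :=
  match groups, cur with
  | (true, g) :: rest, cur => (cur ++ g) :: pvFilt rest
  | groups, [] => pvFilt groups
  | groups, cur => cur :: pvFilt groups

-- A's loop body, over an arbitrary boolean predicate
def pvStep (p : String → Bool) (st : List (List String) × List String) (token : String) :
    List (List String) × List String :=
  if p token then (st.1, st.2 ++ [token])
  else if st.2 ≠ [] then (st.1 ++ [st.2], ([] : List String))
  else st

-- B's pieces, over an arbitrary boolean predicate
def pvCutsFrom (p : String → Bool) (s : Int) (ts : List String) : List Int :=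
  (PySem.List.enumerate ts s).filterMap (fun it => if p it.2 then none else some it.1)

def pvBounds (p : String → Bool) (ts : List String) : List Int :=
  -1 :: (pvCutsFrom p 0 ts ++ [(ts.length : Int)])

def pvSeg (ts : List String) (ab : Int × Int) : Option (List String) :=
  if 1 < ab.2 - ab.1 then some (PySem.List.slice ts (some (ab.1 + 1)) (some ab.2)) else none

def pvPairsOut (p : String → Bool) (ts : List String) : List (List String) :=
  ((pvBounds p ts).zip (pvBounds p ts).tail).filterMap (pvSeg ts)

lemma pvKey (p : String → Bool) (ts : List String) :
    ∀ (segs : List (List String)) (cur : List String),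
      (let st := ts.foldl (pvStep p) (segs, cur)
       if st.2 ≠ [] then st.1 ++ [st.2] else st.1)
        = segs ++ pvGlue (pvGroupby p ts) cur := by
  induction ts with
  | nil =>
      intro segs cur
      cases cur <;> simp [pvGroupby, pvGlue, pvFilt]
  | cons t ts ih =>
      intro segs cur
      simp only [List.foldl_cons]
      by_cases hp : p t = true
      · rw [show pvStep p (segs, cur) t = (segs, cur ++ [t]) by simp [pvStep, hp]]
        rw [ih segs (cur ++ [t])]
        simp only [pvGroupby, hp]
        cases hg : pvGroupby p ts with
        | nil => simp [pvGlue, pvFilt]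
        | cons kg rest =>
            obtain ⟨k, g⟩ := kg
            cases k
            · simp [pvGlue, pvFilt]
            · cases cur <;> simp [pvGlue, pvFilt]
      · have hp' : p t = false := by simpa using hp
        have hstep : pvStep p (segs, cur) t
            = (segs ++ (if cur = [] then [] else [cur]), ([] : List String)) := by
          cases cur <;> simp [pvStep, hp']
        rw [hstep, ih]
        simp only [pvGroupby, hp']
        cases hg : pvGroupby p ts with
        | nil => cases cur <;> simp [pvGlue, pvFilt]
        | cons kg rest =>
            obtain ⟨k, g⟩ := kg
            cases k
            · cases cur <;> simp [pvGlue, pvFilt]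
            · cases cur <;> simp [pvGlue, pvFilt]

-- A's Prop-conditioned loop body is pvStep of the decided predicate
lemma pvStep_eq (min_freq : Int) (freq : PySem.Dict String Int) :
    (fun (st : List (List String) × List String) token =>
        if min_freq ≤ freq.getD token 0 then (st.1, st.2 ++ [token])
        else if st.2 ≠ [] then (st.1 ++ [st.2], ([] : List String))
        else st)
      = pvStep (fun t => decide (min_freq ≤ freq.getD t 0)) := by
  funext st token
  by_cases h : min_freq ≤ freq.getD token 0 <;> simp [pvStep, h]

-- A = pvFilt ∘ pvGroupby
lemma pvA_eq (tokens : List String) (min_freq : Int) :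
    find_all_segments tokens min_freq
      = pvFilt (pvGroupby (fun t => decide (min_freq ≤ (PySem.Dict.counter tokens).getD t 0)) tokens) := by
  unfold find_all_segments
  simp only [pvStep_eq min_freq (PySem.Dict.counter tokens)]
  rw [pvKey (fun t => decide (min_freq ≤ (PySem.Dict.counter tokens).getD t 0)) tokens [] []]
  cases hg : pvGroupby (fun t => decide (min_freq ≤ (PySem.Dict.counter tokens).getD t 0)) tokens with
  | nil => simp [pvGlue, pvFilt]
  | cons kg rest =>
      obtain ⟨k, g⟩ := kg
      cases k <;> simp [pvGlue, pvFilt]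

-- B = pvPairsOut of the same predicate
lemma pvB_eq (tokens : List String) (min_freq : Int) :
    find_all_segments_alt tokens min_freq
      = pvPairsOut (fun t => decide (min_freq ≤ (PySem.Dict.counter tokens).getD t 0)) tokens := by
  unfold find_all_segments_alt pvPairsOut pvBounds pvCutsFrom pvSeg
  have hc : (fun (it : Int × String) =>
        if (PySem.Dict.counter tokens).getD it.2 0 < min_freq then some it.1 else none)
      = (fun (it : Int × String) =>
        if (fun t => decide (min_freq ≤ (PySem.Dict.counter tokens).getD t 0)) it.2 then none else some it.1) := by
    funext it
    simp only [decide_eq_true_eq]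
    split_ifs with h1 h2 <;> first | rfl | omega
  simp only [hc]
  rfl

-- cuts with shifted start = shifted cuts
lemma pvCutsFrom_cons (p : String → Bool) (s : Int) (t : String) (ts : List String) :
    pvCutsFrom p s (t :: ts) = (if p t then [] else [s]) ++ pvCutsFrom p (s + 1) ts := by
  simp only [pvCutsFrom, PySem.List.enumerate_cons, List.filterMap_cons]
  cases hp : p t <;> simp

lemma pvCutsFrom_shift (p : String → Bool) (ts : List String) :
    ∀ s : Int, pvCutsFrom p s ts = (pvCutsFrom p 0 ts).map (· + s) := by
  induction ts with
  | nil => intro s; simp [pvCutsFrom]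
  | cons t ts ih =>
      intro s
      rw [pvCutsFrom_cons, pvCutsFrom_cons, ih (s + 1), ih (0 + 1)]
      have hmap : ∀ u : Int,
          ((pvCutsFrom p 0 ts).map (· + (0 + 1))).map (· + u)
            = (pvCutsFrom p 0 ts).map (· + (u + 1)) := by
        intro u
        rw [List.map_map]
        apply List.map_congr_left
        intro x _
        simp
        ring
      cases hp : p t
      · simp only [Bool.false_eq_true, if_false, List.map_append, List.map_cons,
          List.map_nil, hmap s]
        norm_num
      · simp only [if_true, List.nil_append, hmap s]

lemma pvCuts_cons (p : String → Bool) (t : String) (ts : List String) :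
    pvCutsFrom p 0 (t :: ts)
      = (if p t then [] else [0]) ++ (pvCutsFrom p 0 ts).map (· + 1) := by
  rw [pvCutsFrom_cons, pvCutsFrom_shift p ts (0 + 1)]
  norm_num

-- every cut index is in [0, len)
lemma pvCuts_mem (p : String → Bool) (ts : List String) (x : Int)
    (hx : x ∈ pvCutsFrom p 0 ts) : 0 ≤ x ∧ x < (ts.length : Int) := by
  simp only [pvCutsFrom, List.mem_filterMap] at hx
  obtain ⟨it, hmem, hit⟩ := hx
  rw [PySem.List.mem_enumerate_iff] at hmem
  obtain ⟨k, hk, rfl⟩ := hmem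
  by_cases hp : p ts[k] <;> simp [hp] at hit
  subst hit
  constructor <;> [omega; exact_mod_cast hk]

-- all-frequent prefix shifts the cuts
lemma pvCuts_append_true (p : String → Bool) (pre ts : List String)
    (h : ∀ x ∈ pre, p x = true) :
    pvCutsFrom p 0 (pre ++ ts) = (pvCutsFrom p 0 ts).map (· + (pre.length : Int)) := by
  induction pre with
  | nil => simp
  | cons y pre ih =>
      have hy : p y = true := h y (by simp)
      rw [List.cons_append, pvCuts_cons, hy]
      rw [if_pos rfl, List.nil_append, ih (fun x hx => h x (by simp [hx])), List.map_map]
      simp only [List.length_cons]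
      congr 1
      funext x
      simp
      ring

-- shifting both slice bounds past a prefix
lemma pvSlice_shift (pre xs : List String) (i j : Int) (hi : 0 ≤ i) (hj : 0 ≤ j) :
    PySem.List.slice (pre ++ xs) (some (i + (pre.length : Int))) (some (j + (pre.length : Int)))
      = PySem.List.slice xs (some i) (some j) := by
  rw [PySem.List.slice_toNat _ (by omega) (by omega),
      PySem.List.slice_toNat _ hi hj]
  have h1 : (i + (pre.length : Int)).toNat = i.toNat + pre.length := by omega
  have h2 : (j + (pre.length : Int)).toNat = j.toNat + pre.length := by omega
  rw [h1, h2]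
  have hdrop : (pre ++ xs).drop (i.toNat + pre.length) = xs.drop i.toNat := by
    rw [Nat.add_comm, List.drop_append]
    simp
  rw [hdrop]
  congr 1
  omega

-- the zip-with-tail pairs of a mapped list are the mapped pairs
lemma pvPairs_map (f : Int → Int) (l : List Int) :
    (l.map f).zip (l.map f).tail = (l.zip l.tail).map (Prod.map f f) := by
  cases l with
  | nil => simp
  | cons a l =>
      induction l generalizing a with
      | nil => simp
      | cons b l ih => simp_all [Prod.map]

-- membership in zip-with-tail pairs
lemma pvPairs_mem {a b : Int} {l : List Int} (h : (a, b) ∈ l.zip l.tail) :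
    a ∈ l ∧ b ∈ l.tail := ⟨List.of_mem_zip h |>.1, List.of_mem_zip h |>.2⟩

-- structural characterisation of pvGroupby on a cons
lemma pvGroupby_cons_eq (p : String → Bool) (ts : List String) :
    ∀ t, pvGroupby p (t :: ts)
      = (p t, t :: ts.takeWhile (fun x => p x == p t))
          :: pvGroupby p (ts.dropWhile (fun x => p x == p t)) := by
  induction ts with
  | nil => intro t; simp [pvGroupby]
  | cons u us ih =>
      intro t
      by_cases h : p u = p t
      · have hpred : (fun x => p x == p t) = (fun x => p x == p u) := by
          funext x; rw [h]
        rw [show pvGroupby p (t :: u :: us)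
              = match pvGroupby p (u :: us) with
                | (k, g) :: rest => if p t = k then (k, t :: g) :: rest else (p t, [t]) :: (k, g) :: rest
                | [] => [(p t, [t])] from rfl]
        rw [ih u]
        simp only [h]
        rw [List.takeWhile_cons, List.dropWhile_cons, hpred]
        simp [h]
      · rw [show pvGroupby p (t :: u :: us)
              = match pvGroupby p (u :: us) with
                | (k, g) :: rest => if p t = k then (k, t :: g) :: rest else (p t, [t]) :: (k, g) :: rest
                | [] => [(p t, [t])] from rfl]
        rw [ih u]
        have h' : ¬ (p t = p u) := fun hh => h hh.symm
        simp only [if_neg h']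
        rw [List.takeWhile_cons, List.dropWhile_cons]
        have : (p u == p t) = false := by
          cases hu : p u <;> cases ht : p t <;> simp_all
        simp only [this, if_false, Bool.false_eq_true]
        rw [ih u]

-- dropping an infrequent head does not change the frequent groups
lemma pvFilt_groupby_cons_false (p : String → Bool) (t : String) (ts : List String)
    (hp : p t = false) :
    pvFilt (pvGroupby p (t :: ts)) = pvFilt (pvGroupby p ts) := by
  rw [show pvGroupby p (t :: ts)
        = match pvGroupby p ts with
          | (k, g) :: rest => if p t = k then (k, t :: g) :: rest else (p t, [t]) :: (k, g) :: rest
          | [] => [(p t, [t])] from rfl]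
  cases hg : pvGroupby p ts with
  | nil => simp [pvFilt, hp]
  | cons kg rest =>
      obtain ⟨k, g⟩ := kg
      cases k <;> simp [pvFilt, hp]

-- a frequent head opens the group t :: takeWhile p ts
lemma pvFilt_groupby_cons_true (p : String → Bool) (t : String) (ts : List String)
    (hp : p t = true) :
    pvFilt (pvGroupby p (t :: ts))
      = (t :: ts.takeWhile p) :: pvFilt (pvGroupby p (ts.dropWhile p)) := by
  rw [pvGroupby_cons_eq p ts t, hp]
  have hpred : (fun x => p x == true) = p := by funext x; simp
  simp only [hpred, pvFilt, List.filterMap_cons]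
  simp

-- the first bound after -1 of a dropWhile-ed list is 0
lemma pvCuts_dropWhile_head (p : String → Bool) (ts : List String) :
    pvCutsFrom p 0 (ts.dropWhile p) ++ [((ts.dropWhile p).length : Int)]
      = 0 :: (pvCutsFrom p 0 (ts.dropWhile p) ++ [((ts.dropWhile p).length : Int)]).tail := by
  cases hd : ts.dropWhile p with
  | nil => simp [pvCutsFrom]
  | cons u us =>
      have hu : p u = false := by
        have h1 : ts.dropWhile p ≠ [] := by simp [hd]
        have h2 := List.head_dropWhile_not p h1
        simp only [hd, List.head_cons] at h2
        exact h2
      rw [pvCuts_cons, hu]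
      simp

-- main lemma: B's staged cut/slice computation equals the frequent groups
lemma pvMain (p : String → Bool) :
    ∀ (n : ℕ) (ts : List String), ts.length ≤ n →
      pvPairsOut p ts = pvFilt (pvGroupby p ts) := by
  intro n
  induction n with
  | zero =>
      intro ts hts
      have : ts = [] := List.eq_nil_of_length_eq_zero (Nat.le_zero.mp hts)
      subst this
      simp [pvPairsOut, pvBounds, pvCutsFrom, pvSeg, pvGroupby, pvFilt]
  | succ n ih =>
      intro ts hts
      cases ts with
      | nil => simp [pvPairsOut, pvBounds, pvCutsFrom, pvSeg, pvGroupby, pvFilt]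
      | cons t ts =>
        by_cases hp : p t
        · -- frequent head: peel the whole first run
          set r := ts.takeWhile p with hr
          set rest := ts.dropWhile p with hrest
          have hsplit : t :: ts = (t :: r) ++ rest := by
            simp [hr, hrest, List.takeWhile_append_dropWhile]
          have hpre : ∀ x ∈ t :: r, p x = true := by
            intro x hx
            rcases List.mem_cons.mp hx with rfl | hx
            · exact hp
            · exact List.mem_takeWhile_imp hx
          have hlen : (t :: ts).length = (t :: r).length + rest.length := by
            rw [hsplit, List.length_append]
          -- cuts of (t :: ts)
          have hcuts : pvCutsFrom p 0 (t :: ts)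
              = (pvCutsFrom p 0 rest).map (· + ((t :: r).length : Int)) := by
            rw [hsplit]; exact pvCuts_append_true p (t :: r) rest hpre
          set K : Int := ((t :: r).length : Int) with hK
          have hKpos : 1 ≤ K := by
            rw [hK, List.length_cons]; push_cast; omega
          -- bounds of (t :: ts)
          have hlenI : ((t :: ts).length : Int) = (rest.length : Int) + K := by
            rw [hlen, hK]; push_cast; ring
          have hbounds : pvBounds p (t :: ts)
              = -1 :: ((pvCutsFrom p 0 rest ++ [(rest.length : Int)]).map (· + K)) := by
            simp only [pvBounds, hcuts, List.map_append, List.map_cons, List.map_nil, hlenI]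
          set L : List Int := pvCutsFrom p 0 rest ++ [(rest.length : Int)] with hL
          have hL0 : L = 0 :: L.tail := by
            rw [hL, hrest]; exact pvCuts_dropWhile_head p ts
          -- pairs of bounds (t :: ts)
          have hpairs : (pvBounds p (t :: ts)).zip (pvBounds p (t :: ts)).tail
              = (-1, K) :: ((L.zip L.tail).map (Prod.map (· + K) (· + K))) := by
            rw [hbounds]
            conv_lhs => rw [hL0]
            simp only [List.map_cons, List.zip_cons_cons, List.tail_cons]
            rw [← pvPairs_map (· + K) L]
            conv_rhs => rw [hL0]
            simp
          -- the first pair yields t :: r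
          have hfirst : pvSeg (t :: ts) (-1, K) = some (t :: r) := by
            simp only [pvSeg]
            rw [if_pos (by omega)]
            congr 1
            rw [show (-1 : Int) + 1 = ((0 : ℕ) : Int) from rfl, hK,
                PySem.List.slice_natCast]
            rw [hsplit, List.drop_zero, Nat.sub_zero]
            exact List.take_left
          -- the shifted pairs slice rest
          have hshift : ∀ ab ∈ L.zip L.tail,
              pvSeg (t :: ts) (Prod.map (· + K) (· + K) ab) = pvSeg rest ab := by
            intro ab hab
            obtain ⟨a, b⟩ := ab
            have hmem := pvPairs_mem hab
            have ha : 0 ≤ a := by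
              rcases List.mem_append.mp (hL ▸ hmem.1) with h | h
              · exact (pvCuts_mem p rest a h).1
              · simp at h; omega
            have hb : 0 ≤ b := by
              have hbL : b ∈ L := List.mem_of_mem_tail (hL0 ▸ hmem.2)
              rcases List.mem_append.mp (hL ▸ hbL) with h | h
              · exact (pvCuts_mem p rest b h).1
              · simp at h; omega
            simp only [pvSeg, Prod.map]
            have hcond : (1 < b + K - (a + K)) ↔ (1 < b - a) := by omega
            simp only [hcond]
            by_cases hc : 1 < b - a
            · rw [if_pos hc, if_pos hc]
              congr 1
              have : a + K + 1 = (a + 1) + K := by ring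
              rw [this, hsplit, hK, pvSlice_shift (t :: r) rest (a + 1) b (by omega) hb]
            · rw [if_neg hc, if_neg hc]
          -- assemble the left side
          have hleft : pvPairsOut p (t :: ts)
              = (t :: r) :: (L.zip L.tail).filterMap (pvSeg rest) := by
            rw [pvPairsOut, hpairs]
            simp only [List.filterMap_cons, hfirst, List.filterMap_map]
            congr 1
            exact List.filterMap_congr (fun ab hab => hshift ab hab)
          -- pairsOut of rest drops its degenerate first pair
          have hrestOut : pvPairsOut p rest
              = (L.zip L.tail).filterMap (pvSeg rest) := by
            have h0 : pvSeg rest (-1, 0) = none := by simp [pvSeg]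
            rw [pvPairsOut, show pvBounds p rest = -1 :: L from rfl, hL0]
            simp only [List.tail_cons, List.zip_cons_cons, List.filterMap_cons, h0]
          have hlenrest : rest.length ≤ n := by
            have h1 : rest.length ≤ ts.length := hrest ▸ List.length_dropWhile_le p ts
            have h2 : ts.length ≤ n := by simpa using Nat.lt_succ_iff.mp (Nat.lt_of_lt_of_le (Nat.lt_succ_of_le (Nat.le_refl _)) hts)
            omega
          rw [hleft, ← hrestOut, ih rest hlenrest,
              pvFilt_groupby_cons_true p t ts hp, ← hr, ← hrest]
        · -- infrequent head: drop it
          have hp' : p t = false := by simpa using hp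
          have hleft : pvPairsOut p (t :: ts) = pvPairsOut p ts := by
            have hcuts : pvCutsFrom p 0 (t :: ts)
                = 0 :: (pvCutsFrom p 0 ts).map (· + 1) := by
              rw [pvCuts_cons, hp']; simp
            have hmap : (pvCutsFrom p 0 ts).map (· + 1) ++ [((t :: ts).length : Int)]
                = (pvCutsFrom p 0 ts ++ [(ts.length : Int)]).map (· + 1) := by
              simp [List.map_append]
            set M : List Int := pvCutsFrom p 0 ts ++ [(ts.length : Int)] with hM
            have hbounds : pvBounds p (t :: ts) = -1 :: 0 :: M.map (· + 1) := by
              simp only [pvBounds, hcuts, List.cons_append, hmap]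
            have hM0 : 0 :: M.map (· + 1) = ((-1) :: M).map (· + 1) := by simp
            have hpairs : (pvBounds p (t :: ts)).zip (pvBounds p (t :: ts)).tail
                = (-1, 0) :: (((-1 :: M).zip ((-1) :: M).tail).map (Prod.map (· + 1) (· + 1))) := by
              rw [hbounds, hM0]
              cases hm : M with
              | nil => simp
              | cons m ms =>
                  have hmm := pvPairs_map (· + 1) (m :: ms)
                  simp only [List.map_cons, List.tail_cons] at hmm
                  simp only [List.map_cons, List.zip_cons_cons, List.tail_cons, hmm, Prod.map]
                  norm_num
            have hshift : ∀ ab ∈ (-1 :: M).zip ((-1) :: M).tail,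
                pvSeg (t :: ts) (Prod.map (· + 1) (· + 1) ab) = pvSeg ts ab := by
              intro ab hab
              obtain ⟨a, b⟩ := ab
              have hmem := pvPairs_mem hab
              have ha : -1 ≤ a := by
                rcases List.mem_cons.mp hmem.1 with rfl | h
                · omega
                · rcases List.mem_append.mp (hM ▸ h) with h | h
                  · have := pvCuts_mem p ts a h; omega
                  · simp at h; omega
              have hb : 0 ≤ b := by
                have hbM : b ∈ M := by simpa using hmem.2
                rcases List.mem_append.mp (hM ▸ hbM) with h | h
                · exact (pvCuts_mem p ts b h).1
                · simp at h; omega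
              simp only [pvSeg, Prod.map]
              have hcond : (1 < b + 1 - (a + 1)) ↔ (1 < b - a) := by omega
              simp only [hcond]
              by_cases hc : 1 < b - a
              · rw [if_pos hc, if_pos hc]
                congr 1
                have h1 : a + 1 + 1 = (a + 1) + ([t] : List String).length := by simp
                have h2 : b + 1 = b + ([t] : List String).length := by simp
                rw [h1, h2, show t :: ts = [t] ++ ts from rfl,
                    pvSlice_shift [t] ts (a + 1) b (by omega) hb]
              · rw [if_neg hc, if_neg hc]
            rw [pvPairsOut, hpairs, List.filterMap_cons,
                show pvSeg (t :: ts) (-1, 0) = none by simp [pvSeg],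
                List.filterMap_map]
            rw [show pvPairsOut p ts
                  = ((-1 :: M).zip ((-1) :: M).tail).filterMap (pvSeg ts) from rfl]
            exact List.filterMap_congr (fun ab hab => hshift ab hab)
          have hlents : ts.length ≤ n := by simpa using hts
          rw [hleft, ih ts hlents, pvFilt_groupby_cons_false p t ts hp']

-- ===== VERDICT (by name: the statement is the Claim_ definition above) =====
theorem find_all_segments_spec : Claim_equal_find_all_segments := by
  intro tokens min_freq _
  show _ = _
  rw [pvA_eq, pvB_eq]
  exact (pvMain _ tokens.length tokens (Nat.le_refl _)).symm
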